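-- pv_equiv track=rewrite | github.com/yzzhn/features | generate_features/features/zeek_logs/udfs.py | ssl_subject
-- ===== SOURCE A (Python) =====
-- def ssl_subject(s):
--     default = ["", "", "", "", ""]
--     if s:
--         for internalstring in s.split(","):
--             lhsrhs = internalstring.split("=")
--             if len(lhsrhs) == 2:
--                 if lhsrhs[0] == "CN":
--                     default[0] = lhsrhs[1]
--                 if lhsrhs[0] == "O":
--                     default[1] = lhsrhs[1]
--                 if lhsrhs[0] == "C":
--                     default[2] = lhsrhs[1]
--                 if lhsrhs[0] == "L":
--                     default[3] = lhsrhs[1]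
--                 if lhsrhs[0] == "ST":
--                     default[4] = lhsrhs[1]
--     return default
-- ===== SOURCE B (Python) =====
-- def ssl_subject(s):
--     parts = s.split(",") if s else []
--
--     def last_value(key):
--         # field-major: scan parts from the end and return the first (= last
--         # in original order) well-formed "key=value" entry for this key
--         for part in reversed(parts):
--             kv = part.split("=")
--             if len(kv) == 2 and kv[0] == key:
--                 return kv[1]
--         return ""
--
--     return [last_value(k) for k in ("CN", "O", "C", "L", "ST")]
-- ===== Notes on version B (the rewrite author's own statement) =====
-- stated objective: alternative
-- what changed: B transposes the loops: instead of one part-major pass mutating five slots through a per-key if-chain, it does a field-major search, scanning the comma-split parts from the END with early exit to find the last well-formed key=value entry for each of the five keys independently.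
import Mathlib
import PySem

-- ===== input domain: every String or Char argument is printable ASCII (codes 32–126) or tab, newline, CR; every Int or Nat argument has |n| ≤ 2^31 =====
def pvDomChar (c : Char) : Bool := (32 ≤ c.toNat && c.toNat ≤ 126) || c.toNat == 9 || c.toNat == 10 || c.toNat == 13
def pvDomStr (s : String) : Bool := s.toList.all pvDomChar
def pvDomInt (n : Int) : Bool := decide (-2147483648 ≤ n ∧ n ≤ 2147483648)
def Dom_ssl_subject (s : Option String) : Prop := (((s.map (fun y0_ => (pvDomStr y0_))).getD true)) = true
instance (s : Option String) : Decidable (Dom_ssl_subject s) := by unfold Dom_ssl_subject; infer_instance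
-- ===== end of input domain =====

-- B transposes the loops: a field-major backward scan (last well-formed key=value entry per key, early exit) instead of A's part-major pass mutating five slots through an if-chain.


-- ===== PORT A =====
-- one step of A's loop body: per-key if-chain updating the 5-slot list
def sslStepA (d : List String) (internalstring : String) : List String :=
  let lhsrhs := ((PySem.Str.split? internalstring "=").getD [])
  if lhsrhs.length = 2 then
    let d := if lhsrhs.getD 0 "" = "CN" then d.set 0 (lhsrhs.getD 1 "") else d
    let d := if lhsrhs.getD 0 "" = "O"  then d.set 1 (lhsrhs.getD 1 "") else d
    let d := if lhsrhs.getD 0 "" = "C"  then d.set 2 (lhsrhs.getD 1 "") else d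
    let d := if lhsrhs.getD 0 "" = "L"  then d.set 3 (lhsrhs.getD 1 "") else d
    let d := if lhsrhs.getD 0 "" = "ST" then d.set 4 (lhsrhs.getD 1 "") else d
    d
  else d

def ssl_subject (s : Option String) : List String :=
  let dflt := ["", "", "", "", ""]
  match s with
  | none => dflt
  | some str =>
      if str = "" then dflt
      else (((PySem.Str.split? str ",").getD [])).foldl sslStepA dflt

-- ===== PORT B =====
-- B's inner `for part in reversed(parts): … return kv[1] … return ""`:
-- recursion over the reversed list, early exit on the first match
def sslLastValue : List String → String → String
  | [], _ => ""
  | p :: rest, key =>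
      let kv := ((PySem.Str.split? p "=").getD [])
      if kv.length = 2 ∧ kv.getD 0 "" = key then kv.getD 1 "" else sslLastValue rest key

def ssl_subject_alt (s : Option String) : List String :=
  let parts : List String :=
    match s with
    | none => []
    | some str => if str = "" then [] else ((PySem.Str.split? str ",").getD [])
  ["CN", "O", "C", "L", "ST"].map (fun k => sslLastValue parts.reverse k)

-- ===== PRECONDITION & SPEC =====
def Spec_ssl_subject (s : Option String) (out : List String) : Prop := out = ssl_subject_alt s
instance (s : Option String) (out : List String) : Decidable (Spec_ssl_subject s out) := by unfold Spec_ssl_subject; infer_instance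

-- ===== CLAIM (what is proved, stated in full; the proofs are below) =====
def Claim_equal_ssl_subject : Prop := ∀ (s : Option String), Dom_ssl_subject s → Spec_ssl_subject s (ssl_subject s)

-- ===== LEMMAS AND PROOFS =====
-- forward last-wins accumulator for one key (used only by the proof)
def sslUpd (parts : List String) (k d : String) : String :=
  parts.foldl (fun a p =>
    let kv := ((PySem.Str.split? p "=").getD [])
    if kv.length = 2 ∧ kv.getD 0 "" = k then kv.getD 1 "" else a) d

theorem sslStepA_fields (a b c d e p : String) :
    sslStepA [a, b, c, d, e] p =
      [sslUpd [p] "CN" a, sslUpd [p] "O" b, sslUpd [p] "C" c,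
       sslUpd [p] "L" d, sslUpd [p] "ST" e] := by
  unfold sslStepA sslUpd
  set kv := ((PySem.Str.split? p "=").getD []) with hkv
  by_cases h : kv.length = 2
  · by_cases h1 : kv.getD 0 "" = "CN" <;> by_cases h2 : kv.getD 0 "" = "O" <;>
      by_cases h3 : kv.getD 0 "" = "C" <;> by_cases h4 : kv.getD 0 "" = "L" <;>
      by_cases h5 : kv.getD 0 "" = "ST" <;>
      simp_all [List.set]
  · rw [hkv] at h
    simp [h]
    intro hl
    exact absurd (hkv ▸ hl) h

theorem sslFoldA_fields (parts : List String) (a b c d e : String) :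
    parts.foldl sslStepA [a, b, c, d, e] =
      [sslUpd parts "CN" a, sslUpd parts "O" b, sslUpd parts "C" c,
       sslUpd parts "L" d, sslUpd parts "ST" e] := by
  induction parts generalizing a b c d e with
  | nil => rfl
  | cons p ps ih =>
      simp only [List.foldl_cons, sslStepA_fields]
      rw [ih]
      rfl

theorem sslLastValue_reverse (m : List String) (k : String) :
    sslLastValue m.reverse k = sslUpd m k "" := by
  induction m using List.reverseRecOn with
  | nil => rfl
  | append_singleton m p ih =>
      rw [List.reverse_append]
      unfold sslUpd at ih ⊢
      rw [List.foldl_append]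
      simp only [List.foldl_cons, List.foldl_nil]
      rw [← ih]
      rfl

-- ===== VERDICT (by name: the statement is the Claim_ definition above) =====
theorem ssl_subject_spec : Claim_equal_ssl_subject := by
  intro s _
  unfold Spec_ssl_subject ssl_subject ssl_subject_alt
  match s with
  | none => rfl
  | some str =>
      by_cases h : str = ""
      · simp [h, sslLastValue]
      · simp only [h, ite_false]
        rw [sslFoldA_fields]
        simp [sslLastValue_reverse]
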